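-- pv_equiv track=rewrite | github.com/InderdeepSync/algoexpert_problems | main.py | ambiguous_measurements
-- ===== SOURCE A (Python) =====
-- def ambiguous_measurements(measuring_cups, low, high):
--     # measuring_cups.sort(key=lambda cup: (cup[0], cup[1]))
--
--     if len(measuring_cups) == 0:
--         return 0
--
--     no_of_ways = 0
--     current_high = high
--     current_low = low
--     while current_low >= 0 and current_high >= 0:
--         no_of_ways += ambiguous_measurements(measuring_cups[: -1], current_low, current_high)
--         current_low -= measuring_cups[-1][0]
--         current_high -= measuring_cups[-1][1]
--
--     if current_low <= 0 <= current_high: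
--         no_of_ways += 1
--
--     return no_of_ways
-- ===== SOURCE B (Python) =====
-- def ambiguous_measurements(measuring_cups, low, high):
--     # Top-down dynamic programming memoized on (cups considered, low, high),
--     # with the number of loop iterations computed in closed form.
--     memo = {}
--
--     def ways(i, lo, hi):
--         if i == 0:
--             return 0
--         if lo < 0 or hi < 0:
--             return 1 if lo <= 0 <= hi else 0
--         key = (i, lo, hi)
--         if key in memo:
--             return memo[key]
--         a, b = measuring_cups[i - 1][0], measuring_cups[i - 1][1]
--         cands = []
--         if a > 0:
--             cands.append(lo // a + 1)
--         if b > 0: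
--             cands.append(hi // b + 1)
--         steps = min(cands)
--         result = sum(ways(i - 1, lo - t * a, hi - t * b) for t in range(steps))
--         if lo - steps * a <= 0 <= hi - steps * b:
--             result += 1
--         memo[key] = result
--         return result
--
--     return ways(len(measuring_cups), low, high)
-- ===== Notes on version B (the rewrite author's own statement) =====
-- stated objective: alternative
-- what changed: B replaces A's naive recursion (re-solving each cup prefix for every loop state) by top-down dynamic programming memoized on the state (cups considered, low, high), with each while-loop trip count computed in closed form from floor divisions by the positive cup entries.
import Mathlib
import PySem

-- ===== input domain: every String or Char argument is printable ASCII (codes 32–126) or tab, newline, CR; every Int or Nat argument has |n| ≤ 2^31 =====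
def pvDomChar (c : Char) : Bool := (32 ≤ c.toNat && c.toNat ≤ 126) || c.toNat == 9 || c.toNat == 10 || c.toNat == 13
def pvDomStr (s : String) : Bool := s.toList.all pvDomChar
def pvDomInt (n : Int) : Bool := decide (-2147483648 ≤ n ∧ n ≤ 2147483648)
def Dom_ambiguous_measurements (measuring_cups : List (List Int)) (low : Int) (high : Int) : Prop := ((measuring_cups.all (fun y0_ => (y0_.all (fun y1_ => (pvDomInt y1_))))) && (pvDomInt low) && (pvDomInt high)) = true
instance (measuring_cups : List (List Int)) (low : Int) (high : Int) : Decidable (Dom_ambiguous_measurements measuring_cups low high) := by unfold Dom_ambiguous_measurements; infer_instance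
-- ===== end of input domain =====

-- B replaces A's naive recursion by memoized dynamic programming on the state
-- (number of cups considered, low, high), with a closed-form count of the
-- while-loop steps; the equivalence is proved on all inputs where A returns.

-- ===== PORT A =====
-- A's while loop is the recursion on (low, high) at the same cup list; the guard
-- '1 ≤ a ∨ 1 ≤ b' only makes the loop total in Lean (inside Pre_ with 0 ≤ low and
-- 0 ≤ high it always holds; where both entries of the last cup are ≤ 0 and
-- low, high ≥ 0, Python's loop diverges — outside Pre_).
def ambiguous_measurements (measuring_cups : List (List Int)) (low : Int) (high : Int) : Int :=
  if hne : measuring_cups = [] then 0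
  else
    -- measuring_cups[-1][0] / [-1][1]: in range under Pre_ (pyGetD defaults unreachable there)
    if hgo : 0 ≤ low ∧ 0 ≤ high ∧
        (1 ≤ PySem.List.pyGetD (PySem.List.pyGetD measuring_cups (-1) []) 0 1 ∨
         1 ≤ PySem.List.pyGetD (PySem.List.pyGetD measuring_cups (-1) []) 1 1) then
      ambiguous_measurements (PySem.List.slice measuring_cups none (some (-1))) low high
        + ambiguous_measurements measuring_cups
            (low - PySem.List.pyGetD (PySem.List.pyGetD measuring_cups (-1) []) 0 1)
            (high - PySem.List.pyGetD (PySem.List.pyGetD measuring_cups (-1) []) 1 1)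
    else
      if low ≤ 0 ∧ 0 ≤ high then 1 else 0
termination_by (measuring_cups.length,
  (if 1 ≤ PySem.List.pyGetD (PySem.List.pyGetD measuring_cups (-1) []) 0 1 then low + 1 else high + 1).toNat)
decreasing_by
  · have : 0 < measuring_cups.length := List.length_pos_iff.mpr hne
    left
    simp [PySem.List.slice_to_neg_one]
    omega
  · right
    split_ifs with h
    · omega
    · rcases hgo.2.2 with h1 | h1
      · exact absurd h1 h
      · omega

-- ===== PORT B =====
-- helpers naming Source B's 'a', 'b' and its 'steps = min(cands)' computation
def cupA (measuring_cups : List (List Int)) (i : Nat) : Int :=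
  PySem.List.pyGetD (PySem.List.pyGetD measuring_cups (i : Int) []) 0 1
def cupB (measuring_cups : List (List Int)) (i : Nat) : Int :=
  PySem.List.pyGetD (PySem.List.pyGetD measuring_cups (i : Int) []) 1 1
-- 'min(cands)': Python's min raises ValueError on an empty list (both entries ≤ 0),
-- which Pre_ excludes; the .getD 0 default is never reached inside Pre_.
def amSteps (a b lo hi : Int) : Int :=
  (PySem.List.min?
    ((if 0 < a then [PySem.Int.floordiv lo a + 1] else []) ++
     (if 0 < b then [PySem.Int.floordiv hi b + 1] else []))
    (fun x => x)).getD 0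

-- Source B's inner function 'ways(i, lo, hi)', threading the memo dictionary.
def amWays (measuring_cups : List (List Int)) :
    Nat → Int → Int → PySem.Dict (Int × Int × Int) Int →
    Int × PySem.Dict (Int × Int × Int) Int
  | 0, _, _, memo => (0, memo)
  | i + 1, lo, hi, memo =>
    if lo < 0 ∨ hi < 0 then
      ((if lo ≤ 0 ∧ 0 ≤ hi then (1 : Int) else 0), memo)
    else
      let key : Int × Int × Int := ((i : Int) + 1, lo, hi)
      match memo.get? key with
      | some v => (v, memo)
      | none =>
        let a := cupA measuring_cups i      -- measuring_cups[i-1][0] with Python i = i+1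
        let b := cupB measuring_cups i
        let steps := amSteps a b lo hi
        let p := (PySem.List.pyRange 0 steps 1).foldl
          (fun (p : Int × PySem.Dict (Int × Int × Int) Int) t =>
            let q := amWays measuring_cups i (lo - t * a) (hi - t * b) p.2
            (p.1 + q.1, q.2)) (0, memo)
        let result := if lo - steps * a ≤ 0 ∧ 0 ≤ hi - steps * b then p.1 + 1 else p.1
        (result, p.2.insert key result)
termination_by i => i

def ambiguous_measurements_alt (measuring_cups : List (List Int)) (low : Int) (high : Int) : Int :=
  (amWays measuring_cups measuring_cups.length low high PySem.Dict.empty).1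

-- ===== PRECONDITION & SPEC =====
-- Pre_ excludes ONLY inputs on which A does not return: with low, high ≥ 0, a cup
-- shorter than 2 entries makes A raise IndexError, and a cup with both entries ≤ 0
-- makes A's while loop run forever; every input on which A returns is admitted.
def Pre_ambiguous_measurements (measuring_cups : List (List Int)) (low : Int) (high : Int) : Prop :=
  (low < 0 ∨ high < 0) ∨
    ∀ c ∈ measuring_cups, 2 ≤ c.length ∧ (1 ≤ PySem.List.pyGetD c 0 1 ∨ 1 ≤ PySem.List.pyGetD c 1 1)
instance (measuring_cups : List (List Int)) (low : Int) (high : Int) : Decidable (Pre_ambiguous_measurements measuring_cups low high) := by unfold Pre_ambiguous_measurements; infer_instance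

def pvWitness_ambiguous_measurements : List (List Int) × Int × Int := ([[2, 3], [1, 2]], 2, 4)

def Spec_ambiguous_measurements (measuring_cups : List (List Int)) (low : Int) (high : Int) (out : Int) : Prop := out = ambiguous_measurements_alt measuring_cups low high
instance (measuring_cups : List (List Int)) (low : Int) (high : Int) (out : Int) : Decidable (Spec_ambiguous_measurements measuring_cups low high out) := by unfold Spec_ambiguous_measurements; infer_instance

-- ===== CLAIM (what is proved, stated in full; the proofs are below) =====
def Claim_equal_ambiguous_measurements : Prop := ∀ (measuring_cups : List (List Int)) (low : Int) (high : Int), Dom_ambiguous_measurements measuring_cups low high → Pre_ambiguous_measurements measuring_cups low high → Spec_ambiguous_measurements measuring_cups low high (ambiguous_measurements measuring_cups low high)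

-- ===== LEMMAS AND PROOFS =====

-- The memo-free value of Source B's recursion 'ways i lo hi'.
def amF (measuring_cups : List (List Int)) : Nat → Int → Int → Int
  | 0, _, _ => 0
  | i + 1, lo, hi =>
    if lo < 0 ∨ hi < 0 then
      (if lo ≤ 0 ∧ 0 ≤ hi then (1 : Int) else 0)
    else
      ((PySem.List.pyRange 0 (amSteps (cupA measuring_cups i) (cupB measuring_cups i) lo hi) 1).map
        (fun t => amF measuring_cups i
          (lo - t * cupA measuring_cups i) (hi - t * cupB measuring_cups i))).sum
      + (if lo - amSteps (cupA measuring_cups i) (cupB measuring_cups i) lo hi * cupA measuring_cups i ≤ 0 ∧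
           0 ≤ hi - amSteps (cupA measuring_cups i) (cupB measuring_cups i) lo hi * cupB measuring_cups i then 1 else 0)
termination_by i => i

-- amSteps as an explicit case split
theorem amSteps_eq (a b lo hi : Int) :
    amSteps a b lo hi =
      if 0 < a then
        (if 0 < b then min (PySem.Int.floordiv lo a + 1) (PySem.Int.floordiv hi b + 1)
         else PySem.Int.floordiv lo a + 1)
      else (if 0 < b then PySem.Int.floordiv hi b + 1 else 0) := by
  unfold amSteps
  split_ifs with ha hb hb
  · simp [PySem.List.min?_id_cons]
  · simp [PySem.List.min?_id_cons]
  · simp [PySem.List.min?_id_cons]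
  · simp [PySem.List.min?]

theorem amSteps_pos (a b lo hi : Int) (hab : 1 ≤ a ∨ 1 ≤ b) (hlo : 0 ≤ lo) (hhi : 0 ≤ hi) :
    1 ≤ amSteps a b lo hi := by
  rw [amSteps_eq]
  have h1 : 0 < a → 0 ≤ PySem.Int.floordiv lo a := by
    intro h; rw [PySem.Int.floordiv_eq_ediv_of_pos h]; exact Int.ediv_nonneg hlo (by omega)
  have h2 : 0 < b → 0 ≤ PySem.Int.floordiv hi b := by
    intro h; rw [PySem.Int.floordiv_eq_ediv_of_pos h]; exact Int.ediv_nonneg hhi (by omega)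
  split_ifs with ha hb hb
  · have := h1 ha; have := h2 hb; omega
  · have := h1 ha; omega
  · have := h2 hb; omega
  · omega

theorem amSteps_continue (a b lo hi : Int) (hab : 1 ≤ a ∨ 1 ≤ b)
    (hlo : 0 ≤ lo - a) (hhi : 0 ≤ hi - b) (hlo0 : 0 ≤ lo) (hhi0 : 0 ≤ hi) :
    amSteps a b (lo - a) (hi - b) = amSteps a b lo hi - 1 := by
  have hda : 0 < a → PySem.Int.floordiv (lo - a) a = PySem.Int.floordiv lo a - 1 := by
    intro h
    rw [PySem.Int.floordiv_eq_ediv_of_pos h, PySem.Int.floordiv_eq_ediv_of_pos h]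
    have : lo - a = lo + (-1) * a := by ring
    rw [this, Int.add_mul_ediv_right lo (-1) (by omega : a ≠ 0)]
    ring
  have hdb : 0 < b → PySem.Int.floordiv (hi - b) b = PySem.Int.floordiv hi b - 1 := by
    intro h
    rw [PySem.Int.floordiv_eq_ediv_of_pos h, PySem.Int.floordiv_eq_ediv_of_pos h]
    have : hi - b = hi + (-1) * b := by ring
    rw [this, Int.add_mul_ediv_right hi (-1) (by omega : b ≠ 0)]
    ring
  rw [amSteps_eq, amSteps_eq]
  split_ifs with ha hb hb
  · rw [hda ha, hdb hb]; omega
  · rw [hda ha]; ring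
  · rw [hdb hb]; ring
  · rcases hab with h | h <;> omega

theorem amSteps_last (a b lo hi : Int) (hab : 1 ≤ a ∨ 1 ≤ b)
    (hstop : ¬ (0 ≤ lo - a ∧ 0 ≤ hi - b)) (hlo : 0 ≤ lo) (hhi : 0 ≤ hi) :
    amSteps a b lo hi = 1 := by
  have h1 := amSteps_pos a b lo hi hab hlo hhi
  have hfa : 0 < a → PySem.Int.floordiv lo a = lo / a := fun h => PySem.Int.floordiv_eq_ediv_of_pos h
  have hfb : 0 < b → PySem.Int.floordiv hi b = hi / b := fun h => PySem.Int.floordiv_eq_ediv_of_pos h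
  rw [amSteps_eq] at h1 ⊢
  have hcase : (0 < a ∧ lo < a) ∨ (0 < b ∧ hi < b) := by
    rcases not_and_or.mp hstop with h | h
    · left; constructor <;> omega
    · right; constructor <;> omega
  split_ifs with ha hb hb
  · rcases hcase with ⟨_, hla⟩ | ⟨_, hhb⟩
    · have : lo / a = 0 := Int.ediv_eq_zero_of_lt hlo hla
      rw [hfa ha] at h1 ⊢
      have h2 : 0 ≤ hi / b := Int.ediv_nonneg hhi (by omega)
      rw [hfb hb] at h1 ⊢
      omega
    · have : hi / b = 0 := Int.ediv_eq_zero_of_lt hhi hhb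
      rw [hfa ha, hfb hb] at h1 ⊢
      have h2 : 0 ≤ lo / a := Int.ediv_nonneg hlo (by omega)
      omega
  · rcases hcase with ⟨_, hla⟩ | ⟨hb', _⟩
    · have : lo / a = 0 := Int.ediv_eq_zero_of_lt hlo hla
      rw [hfa ha] at h1 ⊢; omega
    · exact absurd hb' hb
  · rcases hcase with ⟨ha', _⟩ | ⟨_, hhb⟩
    · exact absurd ha' ha
    · have : hi / b = 0 := Int.ediv_eq_zero_of_lt hhi hhb
      rw [hfb hb] at h1 ⊢; omega
  · rcases hab with h | h <;> omega

-- A memo is valid when every stored value is the memo-free value of its key.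
def amValid (measuring_cups : List (List Int)) (memo : PySem.Dict (Int × Int × Int) Int) : Prop :=
  ∀ k v, memo.get? k = some v → v = amF measuring_cups k.1.toNat k.2.1 k.2.2

theorem amValid_insert (measuring_cups : List (List Int))
    (memo : PySem.Dict (Int × Int × Int) Int) (hv : amValid measuring_cups memo)
    (k : Int × Int × Int) (v : Int) (hval : v = amF measuring_cups k.1.toNat k.2.1 k.2.2) :
    amValid measuring_cups (memo.insert k v) := by
  intro k' v' hk'
  by_cases hkk : k' = k
  · subst hkk
    rw [PySem.Dict.get?_insert_self] at hk'
    cases hk'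
    exact hval
  · rw [PySem.Dict.get?_insert_of_ne memo v hkk] at hk'
    exact hv k' v' hk'

theorem amWays_foldl (measuring_cups : List (List Int)) (i : Nat) (a b lo hi : Int)
    (IH : ∀ (lo hi : Int) (memo : PySem.Dict (Int × Int × Int) Int), amValid measuring_cups memo →
      (amWays measuring_cups i lo hi memo).1 = amF measuring_cups i lo hi ∧
      amValid measuring_cups (amWays measuring_cups i lo hi memo).2) :
    ∀ (l : List Int) (acc : Int) (memo : PySem.Dict (Int × Int × Int) Int), amValid measuring_cups memo →
      (l.foldl (fun (p : Int × PySem.Dict (Int × Int × Int) Int) t =>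
          let q := amWays measuring_cups i (lo - t * a) (hi - t * b) p.2
          (p.1 + q.1, q.2)) (acc, memo)).1
        = acc + (l.map (fun t => amF measuring_cups i (lo - t * a) (hi - t * b))).sum ∧
      amValid measuring_cups
        (l.foldl (fun (p : Int × PySem.Dict (Int × Int × Int) Int) t =>
          let q := amWays measuring_cups i (lo - t * a) (hi - t * b) p.2
          (p.1 + q.1, q.2)) (acc, memo)).2 := by
  intro l
  induction l with
  | nil =>
    intro acc memo hv
    constructor
    · simp
    · simpa using hv
  | cons t l ihl =>
    intro acc memo hv
    have h1 := IH (lo - t * a) (hi - t * b) memo hv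
    simp only [List.foldl_cons, List.map_cons, List.sum_cons]
    have h2 := ihl (acc + (amWays measuring_cups i (lo - t * a) (hi - t * b) memo).1)
      (amWays measuring_cups i (lo - t * a) (hi - t * b) memo).2 h1.2
    refine ⟨?_, h2.2⟩
    rw [h2.1, h1.1]
    ring

theorem amWays_correct (measuring_cups : List (List Int)) :
    ∀ (i : Nat) (lo hi : Int) (memo : PySem.Dict (Int × Int × Int) Int),
      amValid measuring_cups memo →
      (amWays measuring_cups i lo hi memo).1 = amF measuring_cups i lo hi ∧
      amValid measuring_cups (amWays measuring_cups i lo hi memo).2 := by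
  intro i
  induction i with
  | zero => intro lo hi memo hv; rw [amWays, amF]; exact ⟨rfl, hv⟩
  | succ i ih =>
    intro lo hi memo hv
    have hc : ((i : Int) + 1).toNat = i + 1 := by omega
    rw [amWays]
    by_cases hneg : lo < 0 ∨ hi < 0
    · rw [amF]
      simp only [if_pos hneg]
      refine ⟨?_, hv⟩
      trivial
    · simp only [if_neg hneg]
      cases hget : memo.get? ((i : Int) + 1, lo, hi) with
      | some v =>
        have hval := hv _ _ hget
        simp only [hc] at hval
        rw [amF, if_neg hneg] at hval
        rw [amF, if_neg hneg]
        exact ⟨hval, hv⟩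
      | none =>
        have hfold := amWays_foldl measuring_cups i
          (cupA measuring_cups i) (cupB measuring_cups i) lo hi ih
          (PySem.List.pyRange 0 (amSteps (cupA measuring_cups i) (cupB measuring_cups i) lo hi) 1)
          0 memo hv
        rw [amF, if_neg hneg]
        simp only [hfold.1, zero_add]
        constructor
        · split <;> ring
        · apply amValid_insert _ _ hfold.2
          simp only [hc]
          rw [amF, if_neg hneg]
          split <;> ring

-- One-step unfolding of A on a nonempty cup list.
theorem amA_unfold (cs : List (List Int)) (hne : cs ≠ []) (lo hi : Int) :
    ambiguous_measurements cs lo hi =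
      (if 0 ≤ lo ∧ 0 ≤ hi ∧ (1 ≤ PySem.List.pyGetD (PySem.List.pyGetD cs (-1) []) 0 1 ∨
                             1 ≤ PySem.List.pyGetD (PySem.List.pyGetD cs (-1) []) 1 1) then
        ambiguous_measurements (PySem.List.slice cs none (some (-1))) lo hi
          + ambiguous_measurements cs
              (lo - PySem.List.pyGetD (PySem.List.pyGetD cs (-1) []) 0 1)
              (hi - PySem.List.pyGetD (PySem.List.pyGetD cs (-1) []) 1 1)
       else if lo ≤ 0 ∧ 0 ≤ hi then 1 else 0) := by
  rw [ambiguous_measurements, dif_neg hne]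
  simp only [dite_eq_ite]

-- A's loop, summed in closed form (the heart of the equivalence).
theorem amLoop_sum (cs : List (List Int)) (hne : cs ≠ [])
    (a b : Int)
    (hA : PySem.List.pyGetD (PySem.List.pyGetD cs (-1) []) 0 1 = a)
    (hB : PySem.List.pyGetD (PySem.List.pyGetD cs (-1) []) 1 1 = b)
    (hab : 1 ≤ a ∨ 1 ≤ b) :
    ∀ (lo hi : Int), 0 ≤ lo → 0 ≤ hi →
      ambiguous_measurements cs lo hi =
        ((PySem.List.pyRange 0 (amSteps a b lo hi) 1).map
          (fun t => ambiguous_measurements (PySem.List.slice cs none (some (-1))) (lo - t * a) (hi - t * b))).sum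
        + (if lo - amSteps a b lo hi * a ≤ 0 ∧ 0 ≤ hi - amSteps a b lo hi * b then 1 else 0) := by
  have main : ∀ (n : Nat) (lo hi : Int), (if 1 ≤ a then lo else hi).toNat = n → 0 ≤ lo → 0 ≤ hi →
      ambiguous_measurements cs lo hi =
        ((PySem.List.pyRange 0 (amSteps a b lo hi) 1).map
          (fun t => ambiguous_measurements (PySem.List.slice cs none (some (-1))) (lo - t * a) (hi - t * b))).sum
        + (if lo - amSteps a b lo hi * a ≤ 0 ∧ 0 ≤ hi - amSteps a b lo hi * b then 1 else 0) := by
    intro n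
    induction n using Nat.strong_induction_on with
    | _ n IH =>
      intro lo hi hn hlo hhi
      rw [amA_unfold cs hne, if_pos ⟨hlo, hhi, by rw [hA, hB]; exact hab⟩, hA, hB]
      by_cases hcont : 0 ≤ lo - a ∧ 0 ≤ hi - b
      · -- the loop body runs again: use the IH at (lo - a, hi - b)
        have hmeas : ((if 1 ≤ a then lo - a else hi - b).toNat) < n := by
          subst hn
          have h1 := hcont.1
          have h2 := hcont.2
          rcases hab with h3 | h3 <;> split_ifs with h <;> omega
        have hrec := IH _ hmeas (lo - a) (hi - b) rfl hcont.1 hcont.2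
        rw [hrec]
        rw [amSteps_continue a b lo hi hab hcont.1 hcont.2 hlo hhi]
        set S := amSteps a b lo hi with hS
        have hS1 : 1 ≤ S := amSteps_pos a b lo hi hab hlo hhi
        have hScont : 2 ≤ S := by
          have h2 := amSteps_pos a b (lo - a) (hi - b) hab hcont.1 hcont.2
          have h3 := amSteps_continue a b lo hi hab hcont.1 hcont.2 hlo hhi
          rw [← hS] at h3
          omega
        -- peel the first loop iteration off the range
        rw [PySem.List.pyRange_one_cons (by omega : (0:Int) < S)]
        simp only [List.map_cons, List.sum_cons, zero_mul, sub_zero]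
        have hshift :
            (PySem.List.pyRange 1 S 1).map
              (fun t => ambiguous_measurements (PySem.List.slice cs none (some (-1))) (lo - t * a) (hi - t * b))
            = (PySem.List.pyRange 0 (S - 1) 1).map
              (fun t => ambiguous_measurements (PySem.List.slice cs none (some (-1))) (lo - a - t * a) (hi - b - t * b)) := by
          rw [PySem.List.pyRange_one 1 S, PySem.List.pyRange_one 0 (S - 1)]
          have : (S - 1).toNat = (S - 1 - 0).toNat := by omega
          rw [← this]
          simp only [List.map_map]
          apply List.map_congr_left
          intro k _
          simp only [Function.comp]
          congr 1 <;> ring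
        simp only [zero_add]
        rw [hshift]
        have hbnd : lo - a - (S - 1) * a = lo - S * a := by ring
        have hbnd' : hi - b - (S - 1) * b = hi - S * b := by ring
        rw [hbnd, hbnd']
        ring
      · -- last iteration: the decremented state leaves the loop at once
        have hS1 : amSteps a b lo hi = 1 := amSteps_last a b lo hi hab hcont hlo hhi
        rw [hS1]
        have hlast : ambiguous_measurements cs (lo - a) (hi - b)
            = if lo - a ≤ 0 ∧ 0 ≤ hi - b then 1 else 0 := by
          rw [amA_unfold cs hne, hA, hB, if_neg (by
            intro h; exact hcont ⟨h.1, h.2.1⟩)]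
        rw [hlast]
        have : PySem.List.pyRange 0 1 1 = [0] := by decide
        rw [this]
        simp only [List.map_cons, List.map_nil, List.sum_cons, List.sum_nil, zero_mul, sub_zero,
          add_zero, one_mul]
  intro lo hi hlo hhi
  exact main (if 1 ≤ a then lo else hi).toNat lo hi rfl hlo hhi

theorem amF_eq_A (measuring_cups : List (List Int))
    (hpre : ∀ c ∈ measuring_cups, 2 ≤ c.length ∧
      (1 ≤ PySem.List.pyGetD c 0 1 ∨ 1 ≤ PySem.List.pyGetD c 1 1)) :
    ∀ (i : Nat), i ≤ measuring_cups.length → ∀ (lo hi : Int),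
      amF measuring_cups i lo hi = ambiguous_measurements (measuring_cups.take i) lo hi := by
  intro i
  induction i with
  | zero =>
    intro _ lo hi
    rw [amF, List.take_zero, ambiguous_measurements, dif_pos rfl]
  | succ i ih =>
    intro hlen lo hi
    have hi' : i < measuring_cups.length := by omega
    have hmem : measuring_cups[i] ∈ measuring_cups := List.getElem_mem hi'
    obtain ⟨hclen, hcab⟩ := hpre _ hmem
    have hcupA : cupA measuring_cups i = PySem.List.pyGetD measuring_cups[i] 0 1 := by
      unfold cupA
      rw [PySem.List.pyGetD_natCast, List.getD_eq_getElem _ _ hi']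
    have hcupB : cupB measuring_cups i = PySem.List.pyGetD measuring_cups[i] 1 1 := by
      unfold cupB
      rw [PySem.List.pyGetD_natCast, List.getD_eq_getElem _ _ hi']
    have hne : measuring_cups.take (i + 1) ≠ [] := by
      intro h
      rcases List.take_eq_nil_iff.mp h with h' | h'
      · omega
      · rw [h'] at hlen; simp at hlen
    have hlast : PySem.List.pyGetD (measuring_cups.take (i + 1)) (-1) [] = measuring_cups[i] := by
      rw [List.take_add_one, List.getElem?_eq_getElem hi']
      simp only [Option.toList_some]
      exact PySem.List.pyGetD_neg_one_append_singleton _ _ _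
    have hdrop : PySem.List.slice (measuring_cups.take (i + 1)) none (some (-1)) = measuring_cups.take i := by
      rw [PySem.List.slice_to_neg_one, List.dropLast_eq_take, List.take_take, List.length_take]
      congr 1
      omega
    rw [amF]
    by_cases hneg : lo < 0 ∨ hi < 0
    · have hnot : ¬(0 ≤ lo ∧ 0 ≤ hi ∧
          (1 ≤ PySem.List.pyGetD (PySem.List.pyGetD (measuring_cups.take (i + 1)) (-1) []) 0 1 ∨
           1 ≤ PySem.List.pyGetD (PySem.List.pyGetD (measuring_cups.take (i + 1)) (-1) []) 1 1)) := by
        intro h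
        rcases hneg with h' | h' <;> [exact absurd h.1 (by omega); exact absurd h.2.1 (by omega)]
      rw [if_pos hneg, amA_unfold _ hne, if_neg hnot]
    · rw [if_neg hneg]
      rw [amLoop_sum (measuring_cups.take (i + 1)) hne
            (cupA measuring_cups i) (cupB measuring_cups i)
            (by rw [hlast, hcupA]) (by rw [hlast, hcupB])
            (by rw [hcupA, hcupB]; exact hcab) lo hi (by omega) (by omega), hdrop]
      congr 1
      exact congrArg List.sum (List.map_congr_left fun t _ => ih (by omega) _ _)

-- ===== VERDICT (by name: the statement is the Claim_ definition above) =====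
theorem ambiguous_measurements_spec : Claim_equal_ambiguous_measurements := by
  intro cups low high _ hpre
  unfold Spec_ambiguous_measurements ambiguous_measurements_alt
  by_cases hgood : ∀ c ∈ cups, 2 ≤ c.length ∧
      (1 ≤ PySem.List.pyGetD c 0 1 ∨ 1 ≤ PySem.List.pyGetD c 1 1)
  · have h1 := amWays_correct cups cups.length low high PySem.Dict.empty (by
      intro k v hk
      simp [PySem.Dict.empty, PySem.Dict.get?] at hk)
    rw [h1.1, amF_eq_A cups hgood cups.length le_rfl, List.take_length]
  · have hneg : low < 0 ∨ high < 0 := hpre.resolve_right hgood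
    cases cups with
    | nil =>
      rw [ambiguous_measurements, dif_pos rfl]
      show (0 : Int) = (amWays [] 0 low high PySem.Dict.empty).1
      rw [amWays]
    | cons c cs =>
      rw [amA_unfold _ (List.cons_ne_nil c cs), if_neg (by
        intro h
        rcases hneg with h' | h' <;> [exact absurd h.1 (by omega); exact absurd h.2.1 (by omega)])]
      show _ = (amWays (c :: cs) (cs.length + 1) low high PySem.Dict.empty).1
      rw [amWays]
      simp only [if_pos hneg]
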